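-- pv_equiv track=rewrite | github.com/sunilsoni/interview-notes-python | com/interview/2025/december/test2/test5.py | add_drama
-- ===== SOURCE A (Python) =====
-- def add_drama(text: str) -> str:
--     out = []
--     i = 0
--     n = len(text)
--     while i < n:
--         c = text[i]
--         if c == '!':
--             j = i
--             while j < n and text[j] == '!':
--                 j += 1
--             out.append('!' * (j - i + 1))
--             i = j
--         elif c == '.':
--             out.append('!')
--             i += 1
--         else:
--             out.append(c)
--             i += 1
--     return "".join(out)
-- ===== SOURCE B (Python) =====
-- def add_drama(text: str) -> str:
--     # Single pass with one-character lookahead: every '!' that ends a run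
--     # (next char is not '!') emits an extra '!'; dots become single bangs.
--     out = []
--     n = len(text)
--     for i, c in enumerate(text):
--         if c == '.':
--             out.append('!')
--         elif c == '!':
--             out.append('!')
--             if i + 1 == n or text[i + 1] != '!':
--                 out.append('!')
--         else:
--             out.append(c)
--     return ''.join(out)
-- ===== Notes on version B (the rewrite author's own statement) =====
-- stated objective: alternative
-- what changed: Replaces A's outer index scan with an inner run-consuming while loop and per-run string multiplication by a single linear pass with one-character lookahead that appends one extra bang only at each run's last bang.
import Mathlib
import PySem

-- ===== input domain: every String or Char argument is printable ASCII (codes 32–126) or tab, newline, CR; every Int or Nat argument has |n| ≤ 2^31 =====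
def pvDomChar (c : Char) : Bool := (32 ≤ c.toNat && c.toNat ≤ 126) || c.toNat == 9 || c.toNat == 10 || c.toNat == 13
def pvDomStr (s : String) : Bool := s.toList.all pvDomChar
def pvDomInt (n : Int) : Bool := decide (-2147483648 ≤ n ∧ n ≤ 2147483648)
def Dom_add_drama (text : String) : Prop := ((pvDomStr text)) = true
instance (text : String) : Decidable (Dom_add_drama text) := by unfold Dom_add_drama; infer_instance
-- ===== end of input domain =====

-- B replaces A's run-consuming inner while loop by a single pass with one-character
-- lookahead (an extra '!' only after a run's last bang). Objective: alternative; same cost.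

-- ===== PORT A =====
-- A's outer while loop over index i becomes structural recursion on the remaining characters;
-- the inner `while j < n and text[j] == '!'` loop is the takeWhile/dropWhile of (· == '!')
-- on the remaining suffix, and `'!' * (j - i + 1)` is List.replicate (run.length + 1) '!'.
def addDramaLoop : List Char → List Char
  | [] => []
  | c :: rest =>
    if c == '!' then
      let run := (c :: rest).takeWhile (· == '!')
      let rest' := (c :: rest).dropWhile (· == '!')
      List.replicate (run.length + 1) '!' ++ addDramaLoop rest'
    else if c == '.' then
      '!' :: addDramaLoop rest
    else
      c :: addDramaLoop rest
  termination_by l => l.length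
  decreasing_by
    · simp_all [List.dropWhile]
      exact List.length_dropWhile_le _ _
    · simp
    · simp

def add_drama (text : String) : String :=
  String.mk (addDramaLoop text.toList)

-- ===== PORT B =====
-- Source B's for-loop with lookahead `text[i+1]` becomes recursion that pattern-matches on
-- the current character together with the (optional) next one: last-char and middle cases.
def dramaLookahead : List Char → List Char
  | [] => []
  | [c] =>
    if c == '.' then ['!']
    else if c == '!' then ['!', '!']
    else [c]
  | c :: d :: rest =>
    if c == '.' then '!' :: dramaLookahead (d :: rest)
    else if c == '!' then
      if d != '!' then '!' :: '!' :: dramaLookahead (d :: rest)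
      else '!' :: dramaLookahead (d :: rest)
    else c :: dramaLookahead (d :: rest)

def add_drama_alt (text : String) : String :=
  String.mk (dramaLookahead text.toList)

-- ===== PRECONDITION & SPEC =====
def Spec_add_drama (text : String) (out : String) : Prop := out = add_drama_alt text
instance (text : String) (out : String) : Decidable (Spec_add_drama text out) := by unfold Spec_add_drama; infer_instance

-- ===== CLAIM (what is proved, stated in full; the proofs are below) =====
def Claim_equal_add_drama : Prop := ∀ (text : String), Dom_add_drama text → Spec_add_drama text (add_drama text)

-- ===== LEMMAS AND PROOFS =====

-- When the next character is also '!', A's loop output peels one bang at a time.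
theorem addDramaLoop_bang_bang (r : List Char) :
    addDramaLoop ('!' :: '!' :: r) = '!' :: addDramaLoop ('!' :: r) := by
  rw [addDramaLoop, addDramaLoop]
  simp [List.takeWhile, List.dropWhile, List.replicate_succ]

-- A '!' followed by a non-bang (or nothing) contributes exactly two bangs.
theorem addDramaLoop_bang_end (r : List Char) (h : ∀ d, r = d :: r.tail → d ≠ '!') :
    addDramaLoop ('!' :: r) = '!' :: '!' :: addDramaLoop r := by
  rw [addDramaLoop]
  cases r with
  | nil => simp [List.takeWhile, List.dropWhile, addDramaLoop]
  | cons d t =>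
    have hd : (d == '!') = false := by simpa using h d rfl
    simp [List.takeWhile, List.dropWhile, hd, List.replicate]

theorem addDramaLoop_eq_lookahead (l : List Char) :
    addDramaLoop l = dramaLookahead l := by
  induction l with
  | nil => simp [addDramaLoop, dramaLookahead]
  | cons c rest ih =>
    cases rest with
    | nil =>
      rw [dramaLookahead, addDramaLoop]
      by_cases hb : c = '!'
      · simp [hb, List.takeWhile, List.dropWhile, addDramaLoop, List.replicate]
      · by_cases hd : c = '.' <;> simp [hb, hd, addDramaLoop]
    | cons d t =>
      rw [dramaLookahead]
      by_cases hb : c = '!'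
      · subst hb
        by_cases hdb : d = '!'
        · subst hdb
          rw [addDramaLoop_bang_bang, ih]
          simp
        · rw [addDramaLoop_bang_end (d :: t) (by intro e he hne; cases he; exact hdb hne), ih]
          simp [hdb]
      · by_cases hd : c = '.'
        · subst hd
          rw [addDramaLoop]
          simp [ih]
        · rw [addDramaLoop]
          simp [hb, hd, ih]

-- ===== VERDICT (by name: the statement is the Claim_ definition above) =====
theorem add_drama_spec : Claim_equal_add_drama := by
  intro text _
  unfold Spec_add_drama add_drama add_drama_alt
  rw [addDramaLoop_eq_lookahead]
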